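-- pv_equiv track=rewrite | github.com/Irajan/sheet-pipeline | sheets_client.py | _match_header
-- ===== SOURCE A (Python) =====
-- from typing import Optional
--
-- def _match_header(key: str, headers: list[str]) -> Optional[str]:
--     if key in headers:
--         return key
--
--     key_lower = key.lower()
--     matches = [h for h in headers if h.lower() == key_lower]
--
--     if not matches:
--         return None
--
--     if len(matches) == 1:
--         return matches[0]
--
--     first_char = key[0] if key else ""
--     first_char_is_upper = first_char.isupper()
--
--     for header in matches:
--         if header and header[0].isupper() == first_char_is_upper:
--             return header
--
--     return matches[0]
-- ===== SOURCE B (Python) =====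
-- def _match_header(key, headers):
--     key_lower = key.lower()
--     want_upper = key[0].isupper() if key else False
--     first_match = None
--     case_match = None
--     for h in headers:
--         if h == key:
--             return key
--         if h.lower() == key_lower:
--             if first_match is None:
--                 first_match = h
--             if case_match is None and h and h[0].isupper() == want_upper:
--                 case_match = h
--     return case_match if case_match is not None else first_match
-- ===== Notes on version B (the rewrite author's own statement) =====
-- stated objective: alternative
-- what changed: Replaces the membership test plus a full filter pass plus a second scan over the matches with one single pass over headers that early-returns on exact match and maintains first-match and first-case-preferred-match accumulators.
import Mathlib
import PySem

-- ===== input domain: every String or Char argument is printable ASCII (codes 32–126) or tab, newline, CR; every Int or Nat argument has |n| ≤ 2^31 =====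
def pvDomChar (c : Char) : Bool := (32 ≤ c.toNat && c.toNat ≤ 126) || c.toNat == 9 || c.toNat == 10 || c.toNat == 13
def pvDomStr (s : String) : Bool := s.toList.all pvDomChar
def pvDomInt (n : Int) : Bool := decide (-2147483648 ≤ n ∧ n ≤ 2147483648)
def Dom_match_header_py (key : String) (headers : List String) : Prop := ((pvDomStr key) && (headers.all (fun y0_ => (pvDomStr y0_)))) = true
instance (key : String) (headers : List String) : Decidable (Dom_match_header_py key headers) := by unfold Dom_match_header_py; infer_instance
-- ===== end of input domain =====

-- B replaces A's three scans (membership test, filter, scan of matches) by one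
-- single pass over headers with an early exact-match return; same return value.

-- shared tiny helper: Python's `s[0].isupper() if s else False` / `s and s[0].isupper()`
-- head test; exact on ASCII (single-char str.isupper = Chars.isupper; "".isupper() = False)
def pvHeadUpper (s : String) : Bool :=
  match s.toList with
  | [] => false
  | c :: _ => PySem.Chars.isupper c

-- ===== PORT A =====
-- the `for header in matches: if header and header[0].isupper() == flag: return header` loop
def pvFindCaseA (flag : Bool) : List String → Option String
  | [] => none
  | h :: t => if h != "" && (pvHeadUpper h == flag) then some h else pvFindCaseA flag t

def match_header_py (key : String) (headers : List String) : Option String :=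
  if headers.contains key then some key
  else
    let keyLower := PySem.Str.lower key
    let ms := headers.filter (fun h => PySem.Str.lower h == keyLower)
    if ms.isEmpty then none
    else if ms.length == 1 then ms.head?
    else
      match pvFindCaseA (pvHeadUpper key) ms with
      | some h => some h
      | none => ms.head?

-- ===== PORT B =====
-- `x if x is not None else y` on the two accumulators
def pvOr (a b : Option String) : Option String :=
  match a with
  | some x => some x
  | none => b

def pvAltLoop (key keyLower : String) (flag : Bool) (firstM caseM : Option String) :
    List String → Option String
  | [] => pvOr caseM firstM
  | h :: t =>
    if h == key then some key
    else if PySem.Str.lower h == keyLower then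
      let firstM' := if firstM.isNone then some h else firstM
      let caseM' := if caseM.isNone && h != "" && (pvHeadUpper h == flag) then some h else caseM
      pvAltLoop key keyLower flag firstM' caseM' t
    else pvAltLoop key keyLower flag firstM caseM t

def match_header_py_alt (key : String) (headers : List String) : Option String :=
  pvAltLoop key (PySem.Str.lower key) (pvHeadUpper key) none none headers

-- ===== PRECONDITION & SPEC =====
def Spec_match_header_py (key : String) (headers : List String) (out : Option String) : Prop := out = match_header_py_alt key headers
instance (key : String) (headers : List String) (out : Option String) : Decidable (Spec_match_header_py key headers out) := by unfold Spec_match_header_py; infer_instance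

-- ===== CLAIM (what is proved, stated in full; the proofs are below) =====
def Claim_equal_match_header_py : Prop := ∀ (key : String) (headers : List String), Dom_match_header_py key headers → Spec_match_header_py key headers (match_header_py key headers)

-- ===== LEMMAS AND PROOFS =====

-- the loop invariant of B: early exact-match exit, otherwise the two accumulators
-- resolve against the first (case-preferred) match in the remaining suffix
theorem pvAltLoop_eq (key keyLower : String) (flag : Bool) (hs : List String) :
    ∀ (fM cM : Option String),
      pvAltLoop key keyLower flag fM cM hs =
        if hs.contains key then some key
        else
          pvOr (pvOr cM (pvFindCaseA flag (hs.filter (fun h => PySem.Str.lower h == keyLower))))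
               (pvOr fM ((hs.filter (fun h => PySem.Str.lower h == keyLower)).head?)) := by
  induction hs with
  | nil => intro fM cM; cases cM <;> cases fM <;> rfl
  | cons h t ih =>
    intro fM cM
    by_cases hk : (h == key) = true
    · have hkey : key = h := (eq_of_beq hk).symm
      subst hkey
      simp [pvAltLoop]
    · have hne : ¬ key = h := fun e => hk (by simp [e])
      by_cases hm : (PySem.Str.lower h == keyLower) = true
      · by_cases hc : t.contains key
        · have hmem : key ∈ t := by simpa using hc
          simp [pvAltLoop, hk, hm, ih, hmem]
        · have hnm : key ∉ t := by simpa using hc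
          simp only [pvAltLoop, hk, hm, if_true, if_false, Bool.false_eq_true, ih,
            List.filter_cons, List.contains_cons]
          cases cM <;> cases fM <;>
            by_cases hcond : (h != "" && (pvHeadUpper h == flag)) = true <;>
            simp [pvFindCaseA, pvOr, hcond, hne, hnm]
      · simp [pvAltLoop, hk, hm, ih fM cM, hne]

theorem match_header_eq (key : String) (headers : List String) :
    match_header_py key headers = match_header_py_alt key headers := by
  unfold match_header_py match_header_py_alt
  rw [pvAltLoop_eq]
  by_cases hc : headers.contains key
  · simp only [hc, if_true]
  · simp only [hc, if_false, Bool.false_eq_true]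
    cases hM : headers.filter (fun h => PySem.Str.lower h == PySem.Str.lower key) with
    | nil => simp [pvOr, pvFindCaseA]
    | cons a t =>
      cases t with
      | nil =>
        simp only [List.isEmpty_cons, List.length_cons, List.length_nil,
          List.head?_cons]
        by_cases hcond : (a != "" && (pvHeadUpper a == pvHeadUpper key)) = true <;>
          simp [pvFindCaseA, pvOr, hcond]
      | cons b t' =>
        simp only [List.isEmpty_cons, List.length_cons, List.head?_cons]
        have hlen : ((t'.length + 1 + 1) == 1) = false := by simp
        simp only [hlen, Bool.false_eq_true, if_false]
        cases hF : pvFindCaseA (pvHeadUpper key) (a :: b :: t') <;> simp [pvOr]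

-- ===== VERDICT (by name: the statement is the Claim_ definition above) =====
theorem match_header_py_spec : Claim_equal_match_header_py := by
  intro key headers _
  exact match_header_eq key headers
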